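-- pv_equiv track=rewrite | github.com/mosePark/Algorithm | 프로그래머스/1/135808. 과일 장수/과일 장수.py | solution
-- ===== SOURCE A (Python) =====
-- def solution(k, m, score):
--
--     score.sort(reverse=True)
--
--     appl = []
--     for i in range(0, len(score), m) :
--         chunk = score[i:i+m]
--         if len(chunk) != m :
--             break
--         appl.append(chunk)
--
--     sales = []
--     for ck in appl :
--         p = min(ck)
--         sales.append(p * m)
--
--     ans = sum(sales)
--     return ans
-- ===== SOURCE B (Python) =====
-- def solution(k, m, score):
--     a = sorted(score)
--     n = len(a)
--     return m * sum(a[n - t * m] for t in range(1, n // m + 1))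
-- ===== Notes on version B (the rewrite author's own statement) =====
-- stated objective: simpler
-- what changed: B drops A's chunk-building pass (slice the descending sort into boxes of m, take min of each box): on the ascending sort the box minima sit exactly at indices n - t*m for t = 1..n//m, so B sums those elements directly and multiplies by m once.
import Mathlib
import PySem

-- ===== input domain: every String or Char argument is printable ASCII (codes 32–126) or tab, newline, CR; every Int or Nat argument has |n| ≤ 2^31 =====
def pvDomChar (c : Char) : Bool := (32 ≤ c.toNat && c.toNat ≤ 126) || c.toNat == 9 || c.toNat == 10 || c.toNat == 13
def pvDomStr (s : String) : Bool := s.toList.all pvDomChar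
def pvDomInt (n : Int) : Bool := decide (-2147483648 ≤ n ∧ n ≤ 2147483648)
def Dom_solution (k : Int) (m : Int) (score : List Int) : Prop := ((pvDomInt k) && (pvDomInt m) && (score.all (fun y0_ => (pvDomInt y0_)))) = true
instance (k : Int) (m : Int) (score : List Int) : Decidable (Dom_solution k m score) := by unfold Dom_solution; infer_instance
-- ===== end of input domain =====

-- B replaces A's chunk-building pass (slice into boxes of m, min of each box) by a direct
-- index formula on the ascending sort: the box minima are exactly a[n - t*m] for t = 1..n//m,
-- so B sums those and multiplies by m once.  Objective: simpler (no asymptotic change).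
-- Note: A sorts `score` in place (an observable mutation); the equivalence proved here is
-- about the return value only — B does not mutate its argument.

-- ===== PORT A =====
-- the `for i in range(0, len(score), m)` loop with its `break`: recursion over the index list
def solutionApplLoop (s : List Int) (m : Int) : List Int → List (List Int)
  | [] => []
  | i :: rest =>
      let chunk := PySem.List.slice s (some i) (some (i + m))
      if (chunk.length : Int) ≠ m then []
      else chunk :: solutionApplLoop s m rest

def solution (k : Int) (m : Int) (score : List Int) : Int :=
  let s := PySem.List.sorted score (fun x => x) true
  let appl := solutionApplLoop s m (PySem.List.pyRange 0 (s.length : Int) m)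
  -- `min(ck)` raises only on an empty list; every chunk kept by the loop has length m ≠ 0,
  -- so the default 0 of `getD` is never used on inputs satisfying Pre_
  let sales := appl.map (fun ck => (PySem.List.min? ck (fun x => x)).getD 0 * m)
  sales.sum

-- ===== PORT B =====
def solution_alt (k : Int) (m : Int) (score : List Int) : Int :=
  let a := PySem.List.sorted score (fun x => x) false
  let n : Int := (a.length : Int)
  -- `sum(a[n - t*m] for t in range(1, n//m + 1))`; for m > 0 every produced index is in
  -- range and for m < 0 the range is empty, so the default 0 of `pyGetD` is never used
  -- on inputs satisfying Pre_
  m * ((PySem.List.pyRange 1 (PySem.Int.floordiv n m + 1) 1).foldl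
        (fun acc t => acc + PySem.List.pyGetD a (n - t * m) 0) 0)

-- ===== PRECONDITION & SPEC =====
-- m = 0 is excluded: there A raises ValueError (range() step 0) and B raises ZeroDivisionError
def Pre_solution (k : Int) (m : Int) (score : List Int) : Prop := m ≠ 0
instance (k : Int) (m : Int) (score : List Int) : Decidable (Pre_solution k m score) := by unfold Pre_solution; infer_instance
def pvWitness_solution : Int × Int × List Int := (2, 2, [1, 2, 2, 1])

def Spec_solution (k : Int) (m : Int) (score : List Int) (out : Int) : Prop := out = solution_alt k m score
instance (k : Int) (m : Int) (score : List Int) (out : Int) : Decidable (Spec_solution k m score out) := by unfold Spec_solution; infer_instance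

-- ===== CLAIM (what is proved, stated in full; the proofs are below) =====
def Claim_equal_solution : Prop := ∀ (k : Int) (m : Int) (score : List Int), Dom_solution k m score → Pre_solution k m score → Spec_solution k m score (solution k m score)

-- ===== LEMMAS AND PROOFS =====

-- range(a, b, s) for a positive step s: empty / cons forms
lemma pyRange_pos_nil {a b s : Int} (hs : 0 < s) (hab : b ≤ a) :
    PySem.List.pyRange a b s = [] := by
  rw [PySem.List.pyRange_of_pos a b hs, if_neg (by omega)]
  simp

lemma pyRange_pos_cons {a b s : Int} (hs : 0 < s) (hab : a < b) :
    PySem.List.pyRange a b s = a :: PySem.List.pyRange (a + s) b s := by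
  rw [PySem.List.pyRange_of_pos a b hs, PySem.List.pyRange_of_pos (a+s) b hs, if_pos hab]
  have hx : (1:Int) ≤ (b - a + s - 1) / s := by
    rw [Int.le_ediv_iff_mul_le hs]; omega
  by_cases h2 : a + s < b
  · rw [if_pos h2]
    have he : (b - (a+s) + s - 1) / s = (b - a + s - 1) / s - 1 := by
      have h3 : b - (a+s) + s - 1 = (b - a + s - 1) + (-1) * s := by ring
      rw [h3, Int.add_mul_ediv_right _ _ (by omega)]; ring
    rw [he]
    have hn : ((b - a + s - 1) / s).toNat = (((b - a + s - 1) / s - 1).toNat) + 1 := by omega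
    rw [hn, List.range_succ_eq_map]
    simp only [List.map_cons, List.map_map, Nat.cast_zero, mul_zero, add_zero, List.cons.injEq]
    refine ⟨trivial, List.map_congr_left ?_⟩
    intro kk _; simp [Function.comp]; ring
  · rw [if_neg h2]
    have hx2 : (b - a + s - 1) / s < 2 := by
      rw [Int.ediv_lt_iff_lt_mul hs]; omega
    have h4 : ((b - a + s - 1) / s).toNat = 1 := by omega
    simp [h4, List.range_succ]

-- the running-min loop on an antitone list ends at the last element
lemma foldl_min_antitone : ∀ (t : List Int) (x : Int), t.Pairwise (fun a b => b ≤ a) →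
    (∀ y ∈ t, y ≤ x) → t.foldl min x = (x :: t).getLast (by simp)
  | [], x, _, _ => by simp
  | y :: t', x, hp, hle => by
    have hp' := (List.pairwise_cons.mp hp)
    have := foldl_min_antitone t' y hp'.2 hp'.1
    simp only [List.foldl_cons]
    rw [min_eq_right (hle y (by simp))]
    rw [this]
    cases t' <;> simp [List.getLast]

-- min of a nonempty antitone list is its last element
lemma min?_of_antitone (l : List Int) (h : l.Pairwise (fun a b => b ≤ a)) (hne : l ≠ []) :
    PySem.List.min? l (fun x => x) = some (l.getLast hne) := by
  cases l with
  | nil => simp at hne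
  | cons x t =>
    rw [PySem.List.min?_id_cons]
    have hp := List.pairwise_cons.mp h
    rw [foldl_min_antitone t x hp.2 hp.1]

-- A's loop, evaluated on the descending sort: sum of the box minima times m
lemma applLoop_sum (d : List Int) (M : Nat) (hM : 0 < M)
    (hd : d.Pairwise (fun a b => b ≤ a)) :
    ∀ (c j : Nat), d.length / M - j ≤ c →
      ((solutionApplLoop d (M : Int) (PySem.List.pyRange ((j * M : Nat) : Int) (d.length : Int) (M : Int))).map
          (fun ck => (PySem.List.min? ck (fun x => x)).getD 0 * (M : Int))).sum
        = ((List.range (d.length / M - j)).map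
            (fun t => d.getD ((j + t + 1) * M - 1) 0 * (M : Int))).sum := by
  have hmul : ∀ j : Nat, (j+1)*M = j*M + M := fun j => by ring
  intro c
  induction c with
  | zero =>
    intro j hj
    have hmj := hmul j
    have hq : d.length / M - j = 0 := by omega
    rw [hq]
    have hlt : d.length < (j + 1) * M := by
      by_contra h
      have : j + 1 ≤ d.length / M := Nat.le_div_iff_mul_le hM |>.mpr (by omega)
      omega
    by_cases hje : d.length ≤ j * M
    · rw [pyRange_pos_nil (by exact_mod_cast hM) (by exact_mod_cast hje)]
      simp [solutionApplLoop]
    · rw [Nat.not_le] at hje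
      rw [pyRange_pos_cons (by exact_mod_cast hM) (by exact_mod_cast hje)]
      simp only [solutionApplLoop]
      have hsl : PySem.List.slice d (some ((j*M : Nat) : Int)) (some (((j*M : Nat) : Int) + (M : Int)))
          = (d.drop (j*M)).take M := PySem.List.slice_natCast_add d (j*M) M
      rw [hsl]
      have hlen : ((d.drop (j*M)).take M).length = d.length - j*M := by
        simp [List.length_take, List.length_drop]; omega
      rw [if_pos]
      · simp
      · rw [hlen]; intro h; have : d.length - j*M = M := by exact_mod_cast h
        omega
  | succ c ih =>
    intro j hj
    have hmj := hmul j
    by_cases hfull : (j + 1) * M ≤ d.length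
    · have hje : j * M < d.length := by nlinarith
      rw [pyRange_pos_cons (by exact_mod_cast hM) (by exact_mod_cast hje)]
      simp only [solutionApplLoop]
      have hsl : PySem.List.slice d (some ((j*M : Nat) : Int)) (some (((j*M : Nat) : Int) + (M : Int)))
          = (d.drop (j*M)).take M := PySem.List.slice_natCast_add d (j*M) M
      rw [hsl]
      have hlen : ((d.drop (j*M)).take M).length = M := by
        simp [List.length_take, List.length_drop]; omega
      rw [if_neg (by rw [hlen]; simp)]
      simp only [List.map_cons, List.sum_cons]
      have hne : (d.drop (j*M)).take M ≠ [] := by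
        intro h; rw [← List.length_eq_zero_iff] at h; omega
      have hpw : ((d.drop (j*M)).take M).Pairwise (fun a b => b ≤ a) :=
        hd.sublist ((List.take_sublist _ _).trans (List.drop_sublist _ _))
      rw [min?_of_antitone _ hpw hne]
      have hidx : (j+1)*M - 1 < d.length := by omega
      have hgl : ((d.drop (j*M)).take M).getLast hne = d[(j+1)*M - 1]'hidx := by
        rw [List.getLast_eq_getElem]
        rw [List.getElem_take, List.getElem_drop]
        congr 1; omega
      have hcast : ((j*M : Nat) : Int) + (M : Int) = (((j+1) * M : Nat) : Int) := by
        push_cast; ring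
      rw [hcast]
      have hq1 : j + 1 ≤ d.length / M := Nat.le_div_iff_mul_le hM |>.mpr (by omega)
      have hqs : d.length / M - j = (d.length / M - (j+1)) + 1 := by omega
      rw [hqs, List.range_succ_eq_map]
      simp only [List.map_cons, List.map_map, List.sum_cons, Option.getD_some]
      rw [ih (j+1) (by omega)]
      congr 1
      · rw [hgl, List.getD_eq_getElem d 0 (by omega : (j + 0 + 1) * M - 1 < d.length)]
      · congr 1
        apply List.map_congr_left
        intro t _
        simp only [Function.comp]
        have he : j + (t+1) + 1 = j + 1 + t + 1 := by omega
        rw [he]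
    · rw [Nat.not_le] at hfull
      have hq : d.length / M - j = 0 := by
        have : d.length / M < j + 1 := Nat.div_lt_iff_lt_mul hM |>.mpr hfull
        omega
      rw [hq]
      by_cases hje : d.length ≤ j * M
      · rw [pyRange_pos_nil (by exact_mod_cast hM) (by exact_mod_cast hje)]
        simp [solutionApplLoop]
      · rw [Nat.not_le] at hje
        rw [pyRange_pos_cons (by exact_mod_cast hM) (by exact_mod_cast hje)]
        simp only [solutionApplLoop]
        rw [PySem.List.slice_natCast_add d (j*M) M]
        have hlen : ((d.drop (j*M)).take M).length = d.length - j*M := by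
          simp [List.length_take, List.length_drop]; omega
        rw [if_pos]
        · simp
        · rw [hlen]; intro h; have : d.length - j*M = M := by exact_mod_cast h
          omega

-- descending sort = reverse of ascending sort (Int values; tied elements are equal values)
lemma sorted_rev_eq_reverse (xs : List Int) :
    PySem.List.sorted xs (fun x => x) true = (PySem.List.sorted xs (fun x => x) false).reverse := by
  apply List.Perm.eq_of_pairwise (le := fun a b => b ≤ a)
  · intro a b _ _ h1 h2; omega
  · exact PySem.List.sorted_pairwise_rev xs (fun x => x)
  · rw [List.pairwise_reverse]
    exact PySem.List.sorted_pairwise xs (fun x => x)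
  · exact ((PySem.List.sorted_perm xs _ true).trans
      ((PySem.List.sorted_perm xs _ false).symm)).trans (List.reverse_perm _).symm

-- n // m ≤ 0 for 0 ≤ n and m < 0
lemma floordiv_nonpos_of_neg (n m : Int) (hn : 0 ≤ n) (hm : m < 0) : PySem.Int.floordiv n m ≤ 0 := by
  by_contra h
  rw [not_le] at h
  have h1 := PySem.Int.floordiv_mul_add_mod n m
  have h2 := PySem.Int.mod_neg_bounds (a := n) hm
  nlinarith [h2.1, h2.2]

-- B's foldl over range(1, n//m + 1), evaluated: the sum of a[n - t*m] times m
lemma alt_sum (a : List Int) (M : Nat) :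
    (M : Int) * ((PySem.List.pyRange 1 (PySem.Int.floordiv (a.length : Int) (M : Int) + 1) 1).foldl
        (fun acc t => acc + PySem.List.pyGetD a ((a.length : Int) - t * (M : Int)) 0) 0)
      = ((List.range (a.length / M)).map
          (fun t => a.getD (a.length - (t+1) * M) 0 * (M : Int))).sum := by
  rw [PySem.Int.floordiv_natCast a.length M]
  have hr : PySem.List.pyRange 1 (((a.length / M : Nat) : Int) + 1) 1
      = (List.range (a.length / M)).map (fun (t : Nat) => (1 : Int) + (t : Int)) := by
    have hn : (((a.length / M : Nat) : Int) + 1 - 1).toNat = a.length / M := by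
      rw [Int.add_sub_cancel, Int.toNat_natCast]
    rw [PySem.List.pyRange_one, hn]
  rw [hr, List.foldl_map, PySem.List.foldl_add, zero_add]
  rw [List.sum_map_mul_right, mul_comm ((M : Int))]
  congr 1
  congr 1
  apply List.map_congr_left
  intro t ht
  rw [List.mem_range] at ht
  have htM : (t + 1) * M ≤ a.length := by
    calc (t + 1) * M ≤ (a.length / M) * M := Nat.mul_le_mul_right M ht
      _ ≤ a.length := Nat.div_mul_le_self _ M
  have hidx : (a.length : Int) - (1 + (t : Int)) * (M : Int) = ((a.length - (t+1) * M : Nat) : Int) := by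
    push_cast [htM]; ring_nf
  rw [hidx]
  rw [PySem.List.pyGetD_of_nonneg _ _ (Int.natCast_nonneg _)]
  rw [Int.toNat_natCast]

lemma solution_eq_alt (k m : Int) (score : List Int) (hm : m ≠ 0) :
    solution k m score = solution_alt k m score := by
  simp only [solution, solution_alt, sorted_rev_eq_reverse score]
  set a := PySem.List.sorted score (fun x => x) false with ha
  rcases lt_or_gt_of_ne hm with hneg | hpos
  · -- m < 0 : both loops are over an empty range, both sides are 0
    have h1 : PySem.List.pyRange 0 ((a.reverse.length : Nat) : Int) m = [] := by
      rw [PySem.List.pyRange_of_neg _ _ hneg, if_neg (by omega)]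
      simp
    have h2 : PySem.List.pyRange 1 (PySem.Int.floordiv ((a.length : Nat) : Int) m + 1) 1 = [] := by
      apply PySem.List.pyRange_one_eq_nil
      have := floordiv_nonpos_of_neg ((a.length : Nat) : Int) m (Int.natCast_nonneg _) hneg
      omega
    rw [h1, h2]
    simp [solutionApplLoop]
  · -- m > 0
    obtain ⟨M, rfl⟩ : ∃ M : Nat, m = (M : Int) := ⟨m.toNat, (Int.toNat_of_nonneg hpos.le).symm⟩
    have hM : 0 < M := by exact_mod_cast hpos
    have hpw : a.reverse.Pairwise (fun x y => y ≤ x) := by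
      rw [List.pairwise_reverse, ha]
      exact PySem.List.sorted_pairwise score (fun x => x)
    have h0 : ((0 * M : Nat) : Int) = 0 := by simp
    have hA := applLoop_sum a.reverse M hM hpw (a.reverse.length / M) 0 (Nat.sub_le _ _)
    rw [h0] at hA
    rw [hA, alt_sum a M]
    simp only [List.length_reverse, Nat.sub_zero]
    congr 1
    apply List.map_congr_left
    intro t ht
    rw [List.mem_range] at ht
    have htM : (t + 1) * M ≤ a.length := by
      calc (t + 1) * M ≤ (a.length / M) * M := Nat.mul_le_mul_right M ht
        _ ≤ a.length := Nat.div_mul_le_self _ M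
    have hpos1 : 0 < (t + 1) * M := Nat.mul_pos (Nat.succ_pos t) hM
    have h1 : (0 + t + 1) * M = (t + 1) * M := by ring
    have hlt : (0 + t + 1) * M - 1 < a.reverse.length := by
      rw [List.length_reverse, h1]; omega
    rw [List.getD_eq_getElem _ _ hlt]
    rw [List.getD_eq_getElem _ _ (by omega : a.length - (t+1) * M < a.length)]
    rw [List.getElem_reverse]
    congr 2
    rw [h1]
    omega

-- ===== VERDICT (by name: the statement is the Claim_ definition above) =====
theorem solution_spec : Claim_equal_solution := by
  intro k m score _ hm
  exact solution_eq_alt k m score hm
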